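-- pv_equiv track=rewrite | github.com/Eric-Wonbin-Sang/CS110Manager | 2020F_quiz_2_pt_2_submissions/nummymatthew/Quiz 2 Part 2.py | string_builder
-- ===== SOURCE A (Python) =====
-- def string_builder(word_array, letter_array, space_array):
--     encrypted_string_array = [0] * len(letter_array)
--     encrypted_string = ""
--     pop_list = []
--     word_lengths = []
--
--     # Fills array with encrypted letters
--     for i in range(len(letter_array)):
--         encrypted_string_array[i] = letter_array[i]
--
--     # Places "word-length letters" after each word.
--     for i in range(len(word_array)):
--         gap_between_spaces = sum(word_lengths) + i + len(word_array[i])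
--         encrypted_string_array.insert(gap_between_spaces, space_array[i])
--         word_lengths.append(len(word_array[i]))
--
--     # Removes extra 0s from encrypted_string_array and turns the array into a string.
--     for i in range(len(encrypted_string_array)):
--         if encrypted_string_array[i] == 0:
--             pop_list.append(i)
--         else:
--             encrypted_string += str(encrypted_string_array[i])
--     for i in reversed(pop_list):
--         encrypted_string_array.pop(i)
--     return encrypted_string
-- ===== SOURCE B (Python) =====
-- def string_builder(word_array, letter_array, space_array):
--     parts = []
--     cursor = 0
--     for i in range(len(word_array)):
--         parts.extend(letter_array[cursor:cursor + len(word_array[i])])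
--         parts.append(space_array[i])
--         cursor += len(word_array[i])
--     parts.extend(letter_array[cursor:])
--     return "".join(parts)
-- ===== Notes on version B (the rewrite author's own statement) =====
-- stated objective: faster
-- what changed: B drops A's sentinel-padded array, the quadratic list.insert loop and the pop bookkeeping, and instead walks letter_array once with a cursor, emitting each word's letter slice followed by its space and joining the parts.
import Mathlib
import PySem

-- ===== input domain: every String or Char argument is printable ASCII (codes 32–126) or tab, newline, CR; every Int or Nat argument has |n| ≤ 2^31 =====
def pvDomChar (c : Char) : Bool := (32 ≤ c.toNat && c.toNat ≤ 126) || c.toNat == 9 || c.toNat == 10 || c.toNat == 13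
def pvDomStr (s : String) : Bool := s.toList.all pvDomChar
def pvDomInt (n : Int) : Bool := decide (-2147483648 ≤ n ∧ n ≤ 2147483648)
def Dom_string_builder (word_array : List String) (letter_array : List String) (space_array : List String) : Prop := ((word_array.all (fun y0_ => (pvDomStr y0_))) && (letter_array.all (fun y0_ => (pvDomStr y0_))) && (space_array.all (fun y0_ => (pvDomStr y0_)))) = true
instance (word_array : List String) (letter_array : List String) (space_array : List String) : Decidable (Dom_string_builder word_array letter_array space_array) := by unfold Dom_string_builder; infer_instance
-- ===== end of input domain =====

-- B replaces A's sentinel-padded array and repeated list.insert by a single cursor pass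
-- over the words, joining letter slices and spaces directly (objective: faster; the
-- timing run measured B faster).

-- ===== PORT A =====
-- Python's encrypted_string_array holds the int 0 (from [0]*len) or a string:
-- ported as Option String, none = 0.  The final pop loop of A only mutates the local
-- array, which is then discarded, so it does not affect the returned string.
def string_builder (word_array : List String) (letter_array : List String) (space_array : List String) : String :=
  let arr0 : List (Option String) := List.replicate letter_array.length none
  -- for i in range(len(letter_array)): encrypted_string_array[i] = letter_array[i]
  -- (index i is always in range, so pyGetD's default is never used)
  let arr1 := (PySem.List.pyRange 0 letter_array.length 1).foldl
      (fun a i => a.set i.toNat (some (PySem.List.pyGetD letter_array i ""))) arr0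
  -- for i in range(len(word_array)): insert space_array[i], append word length
  -- (space_array[i] raises IndexError when i ≥ len(space_array): excluded by Pre_)
  let st := (PySem.List.pyRange 0 word_array.length 1).foldl
      (fun (st : List (Option String) × List Int) i =>
        let gap : Int := st.2.sum + i + (PySem.Str.len (PySem.List.pyGetD word_array i "") : Int)
        (PySem.List.insert st.1 gap (some (PySem.List.pyGetD space_array i "")),
         st.2 ++ [(PySem.Str.len (PySem.List.pyGetD word_array i "") : Int)]))
      (arr1, [])
  -- for i in range(len(encrypted_string_array)): collect pop_list / build the string
  let res := (PySem.List.pyRange 0 st.1.length 1).foldl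
      (fun (acc : List Int × String) i =>
        match PySem.List.pyGetD st.1 i none with
        | none => (acc.1 ++ [i], acc.2)
        | some s => (acc.1, acc.2 ++ s))
      ([], "")
  res.2

-- ===== PORT B =====
-- for i in range(len(word_array)): extend with letter slice, append space_array[i]
-- (space_array[i] raises IndexError when i ≥ len(space_array): excluded by Pre_)
def string_builder_alt (word_array : List String) (letter_array : List String) (space_array : List String) : String :=
  let st := (PySem.List.pyRange 0 word_array.length 1).foldl
      (fun (st : List String × Int) i =>
        (st.1 ++ PySem.List.slice letter_array (some st.2)
              (some (st.2 + (PySem.Str.len (PySem.List.pyGetD word_array i "") : Int)))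
            ++ [PySem.List.pyGetD space_array i ""],
         st.2 + (PySem.Str.len (PySem.List.pyGetD word_array i "") : Int)))
      ([], 0)
  PySem.Str.join "" (st.1 ++ PySem.List.slice letter_array (some st.2) none)

-- ===== PRECONDITION & SPEC =====
-- Both A and B raise IndexError on space_array[i] when word_array is longer than
-- space_array; exactly those inputs are excluded.
def Pre_string_builder (word_array : List String) (letter_array : List String) (space_array : List String) : Prop :=
  word_array.length ≤ space_array.length
instance (word_array : List String) (letter_array : List String) (space_array : List String) : Decidable (Pre_string_builder word_array letter_array space_array) := by unfold Pre_string_builder; infer_instance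

def pvWitness_string_builder : List String × List String × List String :=
  (["hi", "yo"], ["h", "i", "y", "o", "x"], ["Q", "R"])

def Spec_string_builder (word_array : List String) (letter_array : List String) (space_array : List String) (out : String) : Prop := out = string_builder_alt word_array letter_array space_array
instance (word_array : List String) (letter_array : List String) (space_array : List String) (out : String) : Decidable (Spec_string_builder word_array letter_array space_array out) := by unfold Spec_string_builder; infer_instance

-- ===== CLAIM (what is proved, stated in full; the proofs are below) =====
def Claim_equal_string_builder : Prop := ∀ (word_array : List String) (letter_array : List String) (space_array : List String), Dom_string_builder word_array letter_array space_array → Pre_string_builder word_array letter_array space_array → Spec_string_builder word_array letter_array space_array (string_builder word_array letter_array space_array)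

-- ===== LEMMAS AND PROOFS =====

-- the common shape of the output: letter chunks of the words' lengths, each followed by
-- its space, then the remaining letters (cursor c into L)
def pvSpec (L : List String) : List (String × String) → Nat → List String
  | [], c => L.drop c
  | (w, s) :: rest, c => (L.drop c).take w.length ++ [s] ++ pvSpec L rest (c + w.length)


-- length of a word, as the ports see it
lemma pv_len (w : String) : PySem.Str.len w = (w.length : Int) := by
  simp [PySem.Str.len_eq]

-- Python list.insert clamps a past-the-end position to an append
lemma pv_insert_ge {α : Type} (xs : List α) (p : Nat) (v : α) (h : xs.length ≤ p) :
    PySem.List.insert xs (p : Int) v = xs ++ [v] := by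
  simp only [PySem.List.insert, PySem.List.sliceIndices]
  have h1 : ¬ ((1 : Int) < 0) := by omega
  have h2 : ¬ ((p : Int) < 0) := by omega
  simp only [if_neg h1, if_neg h2]
  have : min (p : Int) (xs.length : Int) = (xs.length : Int) := by omega
  rw [this]
  simp [List.take_of_length_le, List.drop_eq_nil_of_le]

-- inserting at A.length + k splits the tail
lemma pv_insert_mid {α : Type} (A T : List α) (k : Nat) (v : α) (hk : k ≤ T.length) :
    PySem.List.insert (A ++ T) ((A.length + k : Nat) : Int) v = A ++ (T.take k ++ v :: T.drop k) := by
  rw [PySem.List.insert_natCast _ _ _ (by simp; omega)]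
  rw [List.take_append, List.drop_append]
  rw [List.take_of_length_le (by omega), List.drop_eq_nil_of_le (by omega)]
  simp

-- "".join distributes over cons
lemma pv_join_cons (s : String) (M : List String) :
    PySem.Str.join "" (s :: M) = s ++ PySem.Str.join "" M := by
  apply String.toList_inj.mp
  rw [String.toList_append, PySem.Str.toList_join, PySem.Str.toList_join]
  cases M with
  | nil => simp [PySem.Chars.join_nil, PySem.Chars.join_singleton]
  | cons t rest => simp [PySem.Chars.join_cons_cons]

-- A's string accumulation is "".join
lemma pv_fold_join (M : List String) : ∀ (a : String),
    M.foldl (fun x s => x ++ s) a = a ++ PySem.Str.join "" M := by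
  induction M with
  | nil => intro a; simp [List.foldl]; apply String.toList_inj.mp; simp [PySem.Str.toList_join, PySem.Chars.join_nil]
  | cons s M ih =>
      intro a
      rw [List.foldl_cons, ih, pv_join_cons, String.append_assoc]

-- cumulative length of the first j words
def pvCum (W : List String) (j : Nat) : Nat := ((W.take j).map String.length).sum

lemma pv_cum_succ (W : List String) (j : Nat) (hj : j < W.length) :
    pvCum W (j + 1) = pvCum W j + W[j].length := by
  unfold pvCum
  simp only [List.map_take]
  rw [List.sum_take_succ _ _ (by simpa using hj)]
  simp

lemma pv_sum_len (l : List String) : (l.map PySem.Str.len).sum = ((l.map String.length).sum : Int) := by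
  induction l with
  | nil => simp
  | cons w l ih => simp [ih]

-- the first loop of A fills the sentinel array with the letters
lemma pv_copy (L : List String) : ∀ (d j : Nat) (pre rest : List (Option String)),
    j + d = L.length → pre.length = j → rest.length = d →
    (PySem.List.pyRange (j : Int) (L.length : Int) 1).foldl
      (fun a i => a.set i.toNat (some (PySem.List.pyGetD L i ""))) (pre ++ rest)
    = pre ++ (L.drop j).map some := by
  intro d
  induction d with
  | zero =>
      intro j pre rest hj hp hr
      rw [List.length_eq_zero_iff.mp hr, PySem.List.pyRange_one_eq_nil (by omega)]
      simp [List.drop_eq_nil_of_le (by omega : L.length ≤ j)]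
  | succ d ih =>
      intro j pre rest hj hp hr
      have hjL : j < L.length := by omega
      rw [PySem.List.pyRange_one_cons (by exact_mod_cast hjL)]
      rw [List.foldl_cons]
      cases rest with
      | nil => simp at hr
      | cons r rest' =>
          have hset : (pre ++ r :: rest').set ((j : Int)).toNat (some (PySem.List.pyGetD L (j : Int) "")) =
              (pre ++ [some L[j]]) ++ rest' := by
            rw [Int.toNat_natCast, List.set_append]
            simp [hp, List.getElem?_eq_getElem hjL]
          rw [hset]
          have : ((j : Int) + 1) = ((j + 1 : Nat) : Int) := by push_cast; ring
          rw [this, ih (j + 1) (pre ++ [some L[j]]) rest' (by omega) (by simp [hp]) (by simpa using hr)]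
          have hd : j < (L.map some).length := by simpa using hjL
          simp only [List.append_assoc, List.singleton_append]
          rw [List.map_drop, List.map_drop, List.drop_eq_getElem_cons hd]
          simp

-- the insert loop of A produces exactly the cursor decomposition pvSpec
lemma pv_Aloop (L W S : List String) (hS : W.length ≤ S.length) :
    ∀ (d j : Nat), j + d = W.length →
    ∀ (acc : List String), acc.length = min (pvCum W j) L.length + j →
    ((PySem.List.pyRange (j : Int) (W.length : Int) 1).foldl
       (fun (st : List (Option String) × List Int) i =>
          (PySem.List.insert st.1 (st.2.sum + i + PySem.Str.len (PySem.List.pyGetD W i ""))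
             (some (PySem.List.pyGetD S i "")),
           st.2 ++ [PySem.Str.len (PySem.List.pyGetD W i "")]))
       (acc.map some ++ (L.drop (pvCum W j)).map some, (W.take j).map PySem.Str.len)).1
    = (acc ++ pvSpec L ((W.zip S).drop j) (pvCum W j)).map some := by
  intro d
  induction d with
  | zero =>
      intro j hj acc hacc
      rw [PySem.List.pyRange_one_eq_nil (by omega)]
      have hdz : (W.zip S).drop j = [] := by
        apply List.drop_eq_nil_of_le; rw [List.length_zip]; omega
      simp [hdz, pvSpec]
  | succ d ih =>
      intro j hj acc hacc
      have hjW : j < W.length := by omega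
      have hjS : j < S.length := by omega
      rw [PySem.List.pyRange_one_cons (by exact_mod_cast hjW)]
      rw [List.foldl_cons]
      have hW : PySem.List.pyGetD W (j : Int) "" = W[j] := by
        simp [List.getElem?_eq_getElem hjW]
      have hSg : PySem.List.pyGetD S (j : Int) "" = S[j] := by
        simp [List.getElem?_eq_getElem hjS]
      have hsum : (((W.take j).map PySem.Str.len).sum + (j : Int) + PySem.Str.len W[j])
          = ((pvCum W j + j + W[j].length : Nat) : Int) := by
        rw [pv_sum_len, pv_len]; unfold pvCum; push_cast; ring
      have hzip : (W.zip S).drop j = (W[j], S[j]) :: (W.zip S).drop (j + 1) := by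
        have hlt : j < (W.zip S).length := by rw [List.length_zip]; omega
        rw [List.drop_eq_getElem_cons hlt, List.getElem_zip]
      -- the array before the insert
      set w := W[j].length with hw
      have hins : PySem.List.insert (acc.map some ++ (L.drop (pvCum W j)).map some)
            ((pvCum W j + j + w : Nat) : Int) (some S[j])
          = (acc ++ (L.drop (pvCum W j)).take w ++ [S[j]]).map some
              ++ (L.drop (pvCum W (j + 1))).map some := by
        have hcum1 : pvCum W (j + 1) = pvCum W j + w := pv_cum_succ W j hjW
        by_cases hcase : pvCum W j + w ≤ L.length
        · -- the insert lands inside the remaining letters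
          have hlacc : (acc.map some).length = pvCum W j + j := by simp [hacc]; omega
          have hp : (pvCum W j + j + w : Nat) = (acc.map some).length + w := by omega
          rw [hp, pv_insert_mid _ _ _ _ (by simp; omega)]
          rw [hcum1]
          simp only [List.map_append, ← List.map_take, ← List.map_drop, List.append_assoc,
            List.drop_drop, List.map_cons, List.map_nil, List.singleton_append]
        · -- the insert position is past the end: Python appends
          rw [pv_insert_ge _ _ _ (by simp [hacc]; omega)]
          have hdrop1 : L.drop (pvCum W (j + 1)) = [] := by
            apply List.drop_eq_nil_of_le; omega
          have htake : (L.drop (pvCum W j)).take w = L.drop (pvCum W j) := by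
            apply List.take_of_length_le; simp; omega
          rw [hdrop1, htake]; simp
      have hwl : (W.take j).map PySem.Str.len ++ [PySem.Str.len W[j]] = (W.take (j + 1)).map PySem.Str.len := by
        have h : W.take (j + 1) = W.take j ++ [W[j]] := by
          rw [List.take_succ, List.getElem?_eq_getElem hjW]; rfl
        rw [h, List.map_append]; rfl
      have hj1 : ((j : Int) + 1) = ((j + 1 : Nat) : Int) := by push_cast; ring
      simp only [hW, hSg, hsum, hins, hwl, hj1]
      rw [ih (j + 1) (by omega) (acc ++ (L.drop (pvCum W j)).take w ++ [S[j]])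
            (by simp [pv_cum_succ W j hjW]; omega)]
      rw [hzip]
      simp [pvSpec, pv_cum_succ W j hjW, hw]

-- B's cursor loop produces the same decomposition pvSpec
lemma pv_Bloop (L W S : List String) (hS : W.length ≤ S.length) :
    ∀ (d j : Nat), j + d = W.length →
    ∀ (parts : List String) (c : Nat),
    (let r := (PySem.List.pyRange (j : Int) (W.length : Int) 1).foldl
        (fun (st : List String × Int) i =>
          (st.1 ++ PySem.List.slice L (some st.2)
                (some (st.2 + (PySem.Str.len (PySem.List.pyGetD W i "") : Int)))
              ++ [PySem.List.pyGetD S i ""],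
           st.2 + (PySem.Str.len (PySem.List.pyGetD W i "") : Int)))
        (parts, (c : Int))
     r.1 ++ PySem.List.slice L (some r.2) none)
    = parts ++ pvSpec L ((W.zip S).drop j) c := by
  intro d
  induction d with
  | zero =>
      intro j hj parts c
      rw [PySem.List.pyRange_one_eq_nil (by omega)]
      have hdz : (W.zip S).drop j = [] := by
        apply List.drop_eq_nil_of_le; rw [List.length_zip]; omega
      simp [hdz, pvSpec, PySem.List.slice_from_natCast]
  | succ d ih =>
      intro j hj parts c
      have hjW : j < W.length := by omega
      have hjS : j < S.length := by omega
      rw [PySem.List.pyRange_one_cons (by exact_mod_cast hjW)]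
      rw [List.foldl_cons]
      have hW : PySem.List.pyGetD W (j : Int) "" = W[j] := by
        simp [List.getElem?_eq_getElem hjW]
      have hSg : PySem.List.pyGetD S (j : Int) "" = S[j] := by
        simp [List.getElem?_eq_getElem hjS]
      have hzip : (W.zip S).drop j = (W[j], S[j]) :: (W.zip S).drop (j + 1) := by
        have hlt : j < (W.zip S).length := by rw [List.length_zip]; omega
        rw [List.drop_eq_getElem_cons hlt, List.getElem_zip]
      have hsl : PySem.List.slice L (some (c : Int)) (some ((c : Int) + PySem.Str.len W[j]))
          = (L.drop c).take W[j].length := by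
        rw [pv_len]; exact PySem.List.slice_natCast_add ..
      have hc : (c : Int) + PySem.Str.len W[j] = ((c + W[j].length : Nat) : Int) := by
        rw [pv_len]; push_cast; ring
      have hj1 : ((j : Int) + 1) = ((j + 1 : Nat) : Int) := by push_cast; ring
      simp only [hW, hSg]
      rw [hsl, hc, hj1]
      rw [ih (j + 1) (by omega) (parts ++ (L.drop c).take W[j].length ++ [S[j]]) (c + W[j].length)]
      rw [hzip]
      simp [pvSpec]

-- the third loop of A only ever sees filled cells and concatenates them
lemma pv_third (N : List (Option String)) : ∀ (d j : Nat), j + d = N.length →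
    ∀ (pl : List Int) (a : String),
    ((PySem.List.pyRange (j : Int) (N.length : Int) 1).foldl
       (fun (acc : List Int × String) i =>
          match PySem.List.pyGetD N i none with
          | none => (acc.1 ++ [i], acc.2)
          | some s => (acc.1, acc.2 ++ s)) (pl, a)).2
    = (N.drop j).foldl (fun (x : String) o => match o with | none => x | some s => x ++ s) a := by
  intro d
  induction d with
  | zero =>
      intro j hj pl a
      rw [PySem.List.pyRange_one_eq_nil (by omega), List.drop_eq_nil_of_le (by omega)]
      simp
  | succ d ih =>
      intro j hj pl a
      have hjN : j < N.length := by omega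
      rw [PySem.List.pyRange_one_cons (by exact_mod_cast hjN), List.foldl_cons]
      have hg : PySem.List.pyGetD N (j : Int) none = N[j] := by
        simp [List.getElem?_eq_getElem hjN]
      rw [hg]
      have hj1 : ((j : Int) + 1) = ((j + 1 : Nat) : Int) := by push_cast; ring
      rw [List.drop_eq_getElem_cons hjN, List.foldl_cons]
      cases hNj : N[j] with
      | none => simp only [hj1]; rw [ih (j + 1) (by omega)]
      | some s => simp only [hj1]; rw [ih (j + 1) (by omega)]

theorem string_builder_spec : Claim_equal_string_builder := by
  intro W L S hdom hpre
  unfold Pre_string_builder at hpre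
  unfold Spec_string_builder string_builder string_builder_alt
  -- the copy loop fills the sentinel array with the letters
  have hcopy := pv_copy L L.length 0 [] (List.replicate L.length none) (by omega) rfl (by simp)
  simp only [List.nil_append, List.drop_zero, Nat.cast_zero] at hcopy
  simp only [hcopy]
  -- the insert loop
  have hA := pv_Aloop L W S hpre W.length 0 (by omega) [] (by simp [pvCum])
  simp only [pvCum, List.take_zero, List.map_nil, List.sum_nil, List.drop_zero, Nat.cast_zero,
    List.nil_append] at hA
  simp only [hA]
  -- the third loop
  set M := pvSpec L (W.zip S) 0 with hM
  have h3 := pv_third (M.map some) (M.map some).length 0 (by omega) [] ""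
  simp only [Nat.cast_zero, List.drop_zero] at h3
  simp only [h3]
  rw [List.foldl_map]
  -- B's loop
  have hB := pv_Bloop L W S hpre W.length 0 (by omega) [] 0
  simp only [Nat.cast_zero, List.nil_append, List.drop_zero] at hB
  rw [← hM] at hB
  rw [hB]
  -- both sides are "".join M
  rw [pv_fold_join M ""]
  apply String.toList_inj.mp
  rw [String.toList_append]
  simp
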